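-- pv_equiv track=rewrite | github.com/hemanth506/Scaler-DSA | Scalar/live-sessions/Assignment/12 - carry-forward/bulbs.py | bulbsNSquare
-- ===== SOURCE A (Python) =====
-- def bulbsNSquare(A):
--     N = len(A)
--     c = 0
--     for i in range(N):
--         if A[i] != 1:
--             for j in range(i+1, N):
--                 if A[j] == 1:
--                     A[j] = 0
--                 else:
--                     A[j] = 1
--             c += 1
--     return c
-- ===== SOURCE B (Python) =====
-- def bulbsNSquare(A):
--     # Single pass: c flips so far; a bulb reads as "on" iff (value == 1) XOR (c is odd).
--     c = 0
--     for x in A: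
--         if (x == 1) == (c % 2 == 1):
--             c += 1
--     return c
-- ===== Notes on version B (the rewrite author's own statement) =====
-- stated objective: alternative
-- what changed: Replaces the nested loop that physically re-flips the whole remaining suffix after each switch press with a single pass that tracks the flip-count parity and decides each bulb's effective state from its original value and that parity; B does not mutate the input list (A does).
import Mathlib
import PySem

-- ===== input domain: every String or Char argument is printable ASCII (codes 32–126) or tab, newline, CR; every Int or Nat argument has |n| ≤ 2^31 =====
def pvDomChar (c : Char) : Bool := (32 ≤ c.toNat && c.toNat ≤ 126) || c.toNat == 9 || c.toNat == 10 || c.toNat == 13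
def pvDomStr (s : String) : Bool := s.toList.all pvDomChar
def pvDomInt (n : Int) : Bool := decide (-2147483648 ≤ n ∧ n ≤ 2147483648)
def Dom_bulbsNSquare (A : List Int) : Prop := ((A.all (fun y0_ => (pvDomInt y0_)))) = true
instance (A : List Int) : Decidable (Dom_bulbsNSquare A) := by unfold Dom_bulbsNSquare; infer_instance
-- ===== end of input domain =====

-- B replaces A's suffix-reflipping nested loop by a single pass over the list tracking flip-count parity (a different algorithm; not measured faster on the timing inputs).
-- A mutates its argument list in place; the equivalence proved here is about the RETURN value only (B does not mutate).


-- ===== PORT A =====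
-- inner j-loop body of A: flip one bulb (1 ↦ 0, anything else ↦ 1)
def pvFlip (y : Int) : Int := if y == 1 then 0 else 1

-- outer i-loop of A over the current (mutated) list state: when the head is not 1,
-- the whole remaining suffix is flipped in place and the counter is incremented
def pvLoopA : List Int → Int → Int
  | [], c => c
  | x :: rest, c =>
      if x ≠ 1 then pvLoopA (rest.map pvFlip) (c + 1) else pvLoopA rest c
termination_by l _ => l.length
decreasing_by all_goals simp

def bulbsNSquare (A : List Int) : Int := pvLoopA A 0

-- ===== PORT B =====
def bulbsNSquare_alt (A : List Int) : Int :=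
  A.foldl (fun c x => if (x == 1) == (c % 2 == 1) then c + 1 else c) 0

-- ===== PRECONDITION & SPEC =====
def Spec_bulbsNSquare (A : List Int) (out : Int) : Prop := out = bulbsNSquare_alt A
instance (A : List Int) (out : Int) : Decidable (Spec_bulbsNSquare A out) := by unfold Spec_bulbsNSquare; infer_instance

-- ===== CLAIM (what is proved, stated in full; the proofs are below) =====
def Claim_equal_bulbsNSquare : Prop := ∀ (A : List Int), Dom_bulbsNSquare A → Spec_bulbsNSquare A (bulbsNSquare A)

-- ===== LEMMAS AND PROOFS =====

-- boolean abstraction of A's loop state: True = bulb currently reads 1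
def gb : List Bool → Int
  | [] => 0
  | b :: r => if b then gb r else 1 + gb (r.map not)
termination_by l => l.length
decreasing_by all_goals simp
theorem pvFlip_eq_one (y : Int) : (pvFlip y == 1) = !(y == 1) := by
  unfold pvFlip
  by_cases h : y = 1 <;> simp [h]

theorem lemA : ∀ (l : List Int) (c : Int),
    pvLoopA l c = c + gb (l.map (fun x => x == 1)) := by
  suffices H : ∀ (n : Nat) (l : List Int), l.length ≤ n → ∀ c,
      pvLoopA l c = c + gb (l.map (fun x => x == 1)) from
    fun l c => H l.length l le_rfl c
  intro n
  induction n with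
  | zero =>
      intro l hl c
      have hnil : l = [] := List.length_eq_zero_iff.mp (Nat.le_zero.mp hl)
      subst hnil
      simp [pvLoopA, gb]
  | succ n ih =>
      intro l hl c
      cases l with
      | nil => simp [pvLoopA, gb]
      | cons x rest =>
          have hr : rest.length ≤ n := by simpa using hl
          rw [pvLoopA]
          by_cases hx : x = 1
          · simp only [hx, ne_eq, not_true_eq_false, if_false]
            rw [ih rest hr]
            simp [gb]
          · simp only [ne_eq, hx, not_false_eq_true, if_true]
            rw [ih (rest.map pvFlip) (by simpa using hr)]
            have hmaps : (rest.map pvFlip).map (fun x => x == 1)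
                = (rest.map (fun x => x == 1)).map not := by
              simp [List.map_map, Function.comp_def, pvFlip_eq_one]
            rw [hmaps]
            have hhead : (x == 1) = false := by simp [hx]
            simp only [List.map_cons, hhead, gb, if_false, Bool.false_eq_true]
            ring
  
-- B's loop on the boolean abstraction
def fb (l : List Bool) (c : Int) : Int :=
  l.foldl (fun c b => if b == (c % 2 == 1) then c + 1 else c) c

theorem lemB_map (l : List Int) : ∀ (c : Int),
    l.foldl (fun c x => if (x == 1) == (c % 2 == 1) then c + 1 else c) c
      = fb (l.map (fun x => x == 1)) c := by
  induction l with
  | nil => intro c; rfl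
  | cons x r ih =>
      intro c
      simp only [fb, List.map_cons, List.foldl_cons] at *
      exact ih _

theorem lemMain : ∀ (l : List Bool) (c : Int),
    fb l c = c + (if c % 2 = 1 then gb (l.map not) else gb l) := by
  intro l
  induction l with
  | nil => intro c; by_cases h : c % 2 = 1 <;> simp [fb, gb, h]
  | cons b r ih =>
      intro c
      have hstep : fb (b :: r) c = fb r (if b == (c % 2 == 1) then c + 1 else c) := rfl
      by_cases hpar : c % 2 = 1
      · have hs : ¬ ((c + 1) % 2 = 1) := by omega
        cases b
        · -- bulb effectively on, no press
          rw [hstep]; simp [hpar, ih, gb]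
        · -- bulb effectively off, press and flip parity
          rw [hstep]; simp [hpar, hs, ih, gb, Function.comp_def]; ring
      · have hs : (c + 1) % 2 = 1 := by omega
        cases b
        · -- bulb off, press and flip parity
          rw [hstep]; simp [hpar, hs, ih, gb]; ring
        · -- bulb on, no press
          rw [hstep]; simp [hpar, ih, gb]

-- ===== VERDICT (by name: the statement is the Claim_ definition above) =====
theorem bulbsNSquare_spec : Claim_equal_bulbsNSquare := by
  intro A _
  unfold Spec_bulbsNSquare bulbsNSquare bulbsNSquare_alt
  rw [lemA, lemB_map, lemMain]
  norm_num
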